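-- pv_equiv track=rewrite | github.com/fomightez/sequencework | alignment-utilities/MSA_to_corresponding_residue_numbers.py | range_extract
-- ===== SOURCE A (Python) =====
-- def range_extract(lst):
--     'Yield 2-tuple ranges or 1-tuple single elements from list of increasing ints'
--     'modified from  https://www.rosettacode.org/wiki/Range_extraction#Python'
--     lenlst = len(lst)
--     i = 0
--     while i< lenlst:
--         low = lst[i]
--         while i <lenlst-1 and lst[i]+1 == lst[i+1]: i +=1
--         hi = lst[i]
--         if hi - low >= 1:    #<---MAIN DIFFERENCE from https://www.rosettacode.org/wiki/Range_extraction#Python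
--             yield (low, hi)
--         else:
--             yield (low,)
--         i += 1
-- ===== SOURCE B (Python) =====
-- def range_extract(lst):
--     'Yield 2-tuple ranges or 1-tuple single elements from list of increasing ints'
--     # Group positions by key v - i: maximal runs of +1-consecutive values share one key,
--     # and a key change (or the start) opens a new group.  One grouping pass, then emit.
--     groups = []
--     prev_key = None
--     for i, v in enumerate(lst):
--         key = v - i
--         if key != prev_key:
--             groups.append([v])
--         else:
--             groups[-1].append(v)
--         prev_key = key
--     for vals in groups:
--         low, hi = vals[0], vals[-1]
--         if hi - low >= 1:
--             yield (low, hi)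
--         else:
--             yield (low,)
-- ===== Notes on version B (the rewrite author's own statement) =====
-- stated objective: idiomatic
-- what changed: Replaces the index-advancing nested while-loop with a single key-based grouping pass (key = value - index, constant on maximal +1-consecutive runs) followed by emitting (first,last) or (first,) per group.
import Mathlib
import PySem

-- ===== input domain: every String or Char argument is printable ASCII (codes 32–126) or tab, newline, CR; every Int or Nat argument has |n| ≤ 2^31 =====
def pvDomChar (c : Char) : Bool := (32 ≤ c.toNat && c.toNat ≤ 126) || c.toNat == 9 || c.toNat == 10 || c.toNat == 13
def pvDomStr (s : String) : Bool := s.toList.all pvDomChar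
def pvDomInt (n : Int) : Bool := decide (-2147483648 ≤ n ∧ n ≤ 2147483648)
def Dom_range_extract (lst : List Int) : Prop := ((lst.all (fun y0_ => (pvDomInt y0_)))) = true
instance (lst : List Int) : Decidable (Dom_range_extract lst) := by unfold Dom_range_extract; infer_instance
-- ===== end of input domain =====

-- B groups positions by the key (value − index) in one pass instead of A's index-advancing
-- nested while-loop; behaviour is identical on every list (proved below), objective: idiomatic.
-- Both Pythons are generators; the equivalence is about the full list of yielded tuples.

-- ===== PORT A =====
-- inner while: advance i while i < n-1 and lst[i]+1 == lst[i+1]; indices stay in range,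
-- so lst.getD · 0 is exactly Python's lst[·] here.
def aInner (lst : List Int) (n i : Nat) : Nat :=
  if i < n - 1 ∧ lst.getD i 0 + 1 = lst.getD (i + 1) 0 then aInner lst n (i + 1) else i
termination_by n - 1 - i
decreasing_by omega

theorem aInner_ge (lst : List Int) (n i : Nat) : i ≤ aInner lst n i := by
  fun_induction aInner with
  | case1 i h ih => omega
  | case2 => omega

-- outer while over i
def aOuter (lst : List Int) (n i : Nat) : List (List Int) :=
  if _h : i < n then
    let low := lst.getD i 0
    let j := aInner lst n i
    let hi := lst.getD j 0
    (if hi - low ≥ 1 then [low, hi] else [low]) :: aOuter lst n (j + 1)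
  else []
termination_by n - i
decreasing_by have := aInner_ge lst n i; omega

def range_extract (lst : List Int) : List (List Int) :=
  aOuter lst lst.length 0

-- ===== PORT B =====
-- enumerate(lst)
def enumFrom (k : Int) : List Int → List (Int × Int)
  | [] => []
  | v :: t => (k, v) :: enumFrom (k + 1) t

-- groups[-1].append(v)  (groups is never empty when this runs)
def appendLast (gs : List (List Int)) (v : Int) : List (List Int) :=
  gs.dropLast ++ [gs.getLastD [] ++ [v]]

-- one step of B's grouping loop: state = (groups, prev_key)
def bStep (st : List (List Int) × Option Int) (p : Int × Int) : List (List Int) × Option Int :=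
  let key := p.2 - p.1
  (if some key ≠ st.2 then st.1 ++ [[p.2]] else appendLast st.1 p.2, some key)

-- second loop: emit (low, hi) or (low,) per group
def emitOne (vals : List Int) : List Int :=
  let low := vals.headD 0
  let hi := vals.getLastD 0
  if hi - low ≥ 1 then [low, hi] else [low]

def range_extract_alt (lst : List Int) : List (List Int) :=
  (((enumFrom 0 lst).foldl bStep ([], none)).1).map emitOne

-- ===== PRECONDITION & SPEC =====
def Spec_range_extract (lst : List Int) (out : List (List Int)) : Prop := out = range_extract_alt lst
instance (lst : List Int) (out : List (List Int)) : Decidable (Spec_range_extract lst out) := by unfold Spec_range_extract; infer_instance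

-- ===== CLAIM (what is proved, stated in full; the proofs are below) =====
def Claim_equal_range_extract : Prop := ∀ (lst : List Int), Dom_range_extract lst → Spec_range_extract lst (range_extract lst)

-- ===== LEMMAS AND PROOFS =====

-- groupby-style span: consume leading pairs whose key equals k
def takeGroup (k : Int) : List (Int × Int) → List Int × List (Int × Int)
  | [] => ([], [])
  | (j, w) :: t =>
    if w - j = k then
      let r := takeGroup k t
      (w :: r.1, r.2)
    else ([], (j, w) :: t)

-- reference grouping: adjacent-equal-key groups
theorem takeGroup_snd_len (k : Int) (l : List (Int × Int)) : (takeGroup k l).2.length ≤ l.length := by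
  induction l with
  | nil => simp [takeGroup]
  | cons p t ih =>
    cases p with
    | mk j w =>
      simp only [takeGroup]
      split
      · simp only [List.length_cons]; omega
      · simp

-- reference grouping: adjacent-equal-key groups
def gGroups : List (Int × Int) → List (List Int)
  | [] => []
  | (i, v) :: t =>
    let r := takeGroup (v - i) t
    (v :: r.1) :: gGroups r.2
termination_by l => l.length
decreasing_by
  have := takeGroup_snd_len (v - i) t
  simp; omega

-- B's fold computes gGroups
theorem fold_group (ps : List (Int × Int)) : ∀ (gs : List (List Int)) (g : List Int) (k : Int),
    ((ps.foldl bStep (gs ++ [g], some k)).1) =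
      (gs ++ [g ++ (takeGroup k ps).1]) ++ gGroups (takeGroup k ps).2 := by
  induction ps with
  | nil => intro gs g k; simp [takeGroup, gGroups]
  | cons p t ih =>
    intro gs g k
    cases p with | mk i v =>
    by_cases hk : v - i = k
    · have hstep : bStep (gs ++ [g], some k) (i, v) = (gs ++ [g ++ [v]], some k) := by
        simp [bStep, appendLast, hk]
      rw [List.foldl_cons, hstep, ih gs (g ++ [v]) k]
      simp [takeGroup, hk]
    · have hstep : bStep (gs ++ [g], some k) (i, v) = ((gs ++ [g]) ++ [[v]], some (v - i)) := by
        simp [bStep, hk]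
      rw [List.foldl_cons, hstep, ih (gs ++ [g]) [v] (v - i)]
      simp [takeGroup, hk, gGroups]

theorem fold_top (ps : List (Int × Int)) : ((ps.foldl bStep ([], none)).1) = gGroups ps := by
  cases ps with
  | nil => simp [gGroups]
  | cons p t =>
    cases p with | mk i v =>
    have hstep : bStep (([] : List (List Int)), (none : Option Int)) (i, v)
        = (([] : List (List Int)) ++ [[v]], some (v - i)) := by
      simp [bStep]
    rw [List.foldl_cons, hstep, fold_group t [] [v] (v - i)]
    simp [gGroups]

theorem drop_cons_getD (lst : List Int) (m : Nat) (h : m < lst.length) :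
    lst.drop m = lst.getD m 0 :: lst.drop (m + 1) := by
  rw [List.drop_eq_getElem_cons h, List.getD_eq_getElem lst 0 h]

-- inner while ↔ takeGroup
theorem inner_char (lst : List Int) (n i : Nat) (hn : n = lst.length) (hi : i < n) :
    i ≤ aInner lst n i ∧ aInner lst n i < n ∧
    ∃ g, takeGroup (lst.getD i 0 - (i : Int)) (enumFrom ((i : Int) + 1) (lst.drop (i + 1)))
          = (g, enumFrom ((aInner lst n i : Nat) + 1) (lst.drop (aInner lst n i + 1)))
      ∧ (lst.getD i 0 :: g).getLastD 0 = lst.getD (aInner lst n i) 0 := by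
  fun_induction aInner with
  | case1 i h ih =>
    have hi1 : i + 1 < n := by omega
    obtain ⟨hle, hlt, g', hg', hlast⟩ := ih hi1
    refine ⟨by omega, hlt, lst.getD (i + 1) 0 :: g', ?_, ?_⟩
    · rw [drop_cons_getD lst (i + 1) (by omega)]
      simp only [enumFrom, takeGroup]
      have hkey : lst.getD (i + 1) 0 - ((i : Int) + 1) = lst.getD i 0 - (i : Int) := by
        have := h.2; omega
      rw [if_pos hkey]
      have : ((i : Int) + 1 + 1) = (((i + 1 : Nat) : Int) + 1) := by push_cast; ring
      rw [this]
      have hkey2 : lst.getD i 0 - (i : Int) = lst.getD (i + 1) 0 - ((i + 1 : Nat) : Int) := by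
        have := h.2; push_cast; omega
      rw [hkey2, hg']
    · simpa using hlast
  | case2 i h =>
    refine ⟨le_refl i, hi, [], ?_, by simp⟩
    by_cases hend : i + 1 < n
    · have hne : lst.getD i 0 + 1 ≠ lst.getD (i + 1) 0 := by
        intro hc; exact h ⟨by omega, hc⟩
      rw [drop_cons_getD lst (i + 1) (by omega)]
      simp only [enumFrom, takeGroup]
      rw [if_neg (by intro hc; apply hne; omega)]
    · have : lst.drop (i + 1) = [] := List.drop_eq_nil_of_le (by omega)
      simp [this, takeGroup, enumFrom]

-- outer while ↔ map emitOne over gGroups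
theorem outer_char (lst : List Int) (n i : Nat) (hn : n = lst.length) :
    aOuter lst n i = (gGroups (enumFrom (i : Int) (lst.drop i))).map emitOne := by
  fun_induction aOuter with
  | case1 i hi low j hi' ih =>
    obtain ⟨hle, hlt, g, hg, hlast⟩ := inner_char lst n i hn hi
    rw [drop_cons_getD lst i (by omega)]
    simp only [enumFrom, gGroups]
    rw [hg]
    simp only [List.map_cons]
    have hemit : emitOne (lst.getD i 0 :: g) =
        (if lst.getD j 0 - lst.getD i 0 ≥ 1 then [lst.getD i 0, lst.getD j 0] else [lst.getD i 0]) := by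
      simp only [emitOne, List.headD_cons]
      rw [hlast]
    rw [hemit, ih]
    push_cast
    ring_nf
    rfl
  | case2 i hi =>
    have : lst.drop i = [] := List.drop_eq_nil_of_le (by omega)
    simp [this, enumFrom, gGroups]

-- ===== VERDICT (by name: the statement is the Claim_ definition above) =====
theorem range_extract_spec : Claim_equal_range_extract := by
  intro lst _
  show range_extract lst = range_extract_alt lst
  rw [range_extract, range_extract_alt, fold_top, outer_char lst lst.length 0 rfl]
  simp
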